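-- pv_equiv track=rewrite | github.com/Chowlett2/programming_challenges | dont_roll_doubles.py | diceGame
-- ===== SOURCE A (Python) =====
-- def diceGame(lst):
--     total = 0
--     for i in lst:
--         if i[0] == i[1]:
--             return 0
--         else:
--             total += i[0] + i[1]
--     return total
-- ===== SOURCE B (Python) =====
-- def diceGame(lst):
--     if any(p[0] == p[1] for p in lst):
--         return 0
--     return sum(p[0] + p[1] for p in lst)
-- ===== Notes on version B (the rewrite author's own statement) =====
-- stated objective: simpler
-- what changed: Replaced the fused scan-with-early-return by two passes: an any() doubles check followed by a sum() comprehension.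
import Mathlib
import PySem

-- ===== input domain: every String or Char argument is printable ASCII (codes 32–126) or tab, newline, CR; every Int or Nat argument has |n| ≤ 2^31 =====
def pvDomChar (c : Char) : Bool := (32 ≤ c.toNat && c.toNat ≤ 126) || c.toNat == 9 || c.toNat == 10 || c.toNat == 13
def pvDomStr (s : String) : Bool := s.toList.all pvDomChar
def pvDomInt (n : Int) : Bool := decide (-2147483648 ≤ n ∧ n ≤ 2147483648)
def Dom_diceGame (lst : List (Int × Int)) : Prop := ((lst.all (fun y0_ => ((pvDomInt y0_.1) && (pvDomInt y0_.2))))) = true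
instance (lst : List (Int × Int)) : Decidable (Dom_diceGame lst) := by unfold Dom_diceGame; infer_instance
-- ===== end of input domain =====

-- B replaces A's fused scan-with-early-return by two passes (doubles check, then sum); objective: simpler. A = B everywhere.

-- ===== PORT A =====
-- A: single fused loop with early return 0 on the first double, else accumulate sums
def diceGameLoop (lst : List (Int × Int)) (total : Int) : Int :=
  match lst with
  | [] => total
  | i :: rest => if i.1 = i.2 then 0 else diceGameLoop rest (total + (i.1 + i.2))

def diceGame (lst : List (Int × Int)) : Int := diceGameLoop lst 0

-- ===== PORT B =====
-- B: two passes — any() doubles check, then sum() of pair sums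
def diceGame_alt (lst : List (Int × Int)) : Int :=
  if lst.any (fun p => p.1 == p.2) then 0
  else (lst.map (fun p => p.1 + p.2)).sum

-- ===== PRECONDITION & SPEC =====
def Spec_diceGame (lst : List (Int × Int)) (out : Int) : Prop := out = diceGame_alt lst
instance (lst : List (Int × Int)) (out : Int) : Decidable (Spec_diceGame lst out) := by unfold Spec_diceGame; infer_instance

-- ===== CLAIM (what is proved, stated in full; the proofs are below) =====
def Claim_equal_diceGame : Prop := ∀ (lst : List (Int × Int)), Dom_diceGame lst → Spec_diceGame lst (diceGame lst)

-- ===== LEMMAS AND PROOFS =====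

-- ===== VERDICT (by name: the statement is the Claim_ definition above) =====
lemma diceGameLoop_eq (lst : List (Int × Int)) (total : Int) :
    diceGameLoop lst total =
      (if lst.any (fun p => p.1 == p.2) then 0
       else total + (lst.map (fun p => p.1 + p.2)).sum) := by
  induction lst generalizing total with
  | nil => simp [diceGameLoop]
  | cons i rest ih =>
    simp only [diceGameLoop, List.any_cons, List.map_cons, List.sum_cons]
    by_cases h : i.1 = i.2
    · simp [h]
    · simp only [h, if_false, ih]
      have : (i.1 == i.2) = false := by simp [h]
      rw [this]
      by_cases h2 : rest.any (fun p => p.1 == p.2)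
      · simp [h2]
      · simp only [eq_false_of_ne_true h2, Bool.false_or, if_neg Bool.false_ne_true]
        ring

theorem diceGame_spec : Claim_equal_diceGame := by
  intro lst _
  unfold Spec_diceGame diceGame diceGame_alt
  rw [diceGameLoop_eq]
  simp
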